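-- pv_equiv track=rewrite | github.com/maybeLee/DLLens | codes/constraints/constraint_extractor.py | cons_is_valid
-- ===== SOURCE A (Python) =====
-- def cons_is_valid(cons: list[str]) -> bool:
--     """
--     Use a simple rule to check if the cons is valid.
--     Rule:
--     invalid cons: there are two strings have the same prefix while one ends with 'is True' and another one ends with 'is False'.
--     Example:
--     ["XXX is True", "XXX is False"] -> False
--     ["XXX is True", "YYY is False"] -> True
--     :param cons:
--     :return:
--     """
--     seen = {}  # Dictionary to store seen prefixes
--
--     for s in cons:
--         if s.endswith(" is True"):
--             prefix = s[:-8]  # Remove " is True" to get the prefix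
--             if prefix in seen and seen[prefix] == "False":
--                 return False  # Found a matching pair
--             seen[prefix] = "True"
--
--         elif s.endswith(" is False"):
--             prefix = s[:-9]  # Remove " is False" to get the prefix
--             if prefix in seen and seen[prefix] == "True":
--                 return False  # Found a matching pair
--             seen[prefix] = "False"
--
--     return True  # No matching pairs found
-- ===== SOURCE B (Python) =====
-- def cons_is_valid(cons: list[str]) -> bool:
--     true_prefixes = set()
--     false_prefixes = set()
--     for s in cons:
--         if s.endswith(" is True"):
--             true_prefixes.add(s[:-8])
--         elif s.endswith(" is False"):
--             false_prefixes.add(s[:-9])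
--     return true_prefixes.isdisjoint(false_prefixes)
-- ===== Notes on version B (the rewrite author's own statement) =====
-- stated objective: simpler
-- what changed: Replaces the polarity dict with its last-write overwrites and the mid-loop early return by an unconditional one-pass collection of the two prefix sets followed by a single disjointness test after the loop.
import Mathlib
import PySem

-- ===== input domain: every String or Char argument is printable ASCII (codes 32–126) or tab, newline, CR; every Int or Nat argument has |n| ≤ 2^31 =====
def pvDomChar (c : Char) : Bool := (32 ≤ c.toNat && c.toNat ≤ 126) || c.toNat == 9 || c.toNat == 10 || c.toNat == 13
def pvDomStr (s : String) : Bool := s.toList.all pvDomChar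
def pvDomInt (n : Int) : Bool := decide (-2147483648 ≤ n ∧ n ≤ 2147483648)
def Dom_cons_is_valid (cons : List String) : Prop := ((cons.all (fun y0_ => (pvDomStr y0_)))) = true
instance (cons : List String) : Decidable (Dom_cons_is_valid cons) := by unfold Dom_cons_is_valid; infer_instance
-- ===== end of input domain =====

-- B replaces A's polarity dict and mid-loop early return by collecting the two prefix
-- sets in one unconditional pass and testing their disjointness afterwards (objective: simpler).

-- ===== PORT A =====
-- the for-loop over cons with the `seen` dict and the early `return False`
def consSeenLoop : List String → PySem.Dict String String → Bool
  | [], _ => true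
  | s :: rest, seen =>
    if PySem.Str.endswith s " is True" then
      let p := PySem.Str.slice s none (some (-8))
      if seen.get? p = some "False" then false
      else consSeenLoop rest (seen.insert p "True")
    else if PySem.Str.endswith s " is False" then
      let p := PySem.Str.slice s none (some (-9))
      if seen.get? p = some "True" then false
      else consSeenLoop rest (seen.insert p "False")
    else consSeenLoop rest seen

def cons_is_valid (cons : List String) : Bool :=
  consSeenLoop cons PySem.Dict.empty

-- ===== PORT B =====
-- one loop iteration of Source B: add the stripped prefix to the matching set
def altStep (acc : PySem.Set String × PySem.Set String) (s : String) :
    PySem.Set String × PySem.Set String :=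
  if PySem.Str.endswith s " is True" then
    (PySem.Set.add acc.1 (PySem.Str.slice s none (some (-8))), acc.2)
  else if PySem.Str.endswith s " is False" then
    (acc.1, PySem.Set.add acc.2 (PySem.Str.slice s none (some (-9))))
  else acc

def cons_is_valid_alt (cons : List String) : Bool :=
  let tf := cons.foldl altStep ([], [])
  PySem.Set.isdisjoint tf.1 tf.2

-- ===== PRECONDITION & SPEC =====
def Spec_cons_is_valid (cons : List String) (out : Bool) : Prop := out = cons_is_valid_alt cons
instance (cons : List String) (out : Bool) : Decidable (Spec_cons_is_valid cons out) := by unfold Spec_cons_is_valid; infer_instance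

-- ===== CLAIM (what is proved, stated in full; the proofs are below) =====
def Claim_equal_cons_is_valid : Prop := ∀ (cons : List String), Dom_cons_is_valid cons → Spec_cons_is_valid cons (cons_is_valid cons)

-- ===== LEMMAS AND PROOFS =====

-- membership in either accumulated set is preserved by B's loop
lemma mem_foldl_altStep_fst {x : String} (l : List String) (ts fs : PySem.Set String)
    (h : x ∈ ts) : x ∈ (l.foldl altStep (ts, fs)).1 := by
  induction l generalizing ts fs with
  | nil => exact h
  | cons s rest ih =>
    simp only [List.foldl_cons]
    unfold altStep
    split_ifs with h1 h2
    · exact ih _ _ (by simp [PySem.Set.mem_add, h])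
    · exact ih _ _ h
    · exact ih _ _ h

lemma mem_foldl_altStep_snd {x : String} (l : List String) (ts fs : PySem.Set String)
    (h : x ∈ fs) : x ∈ (l.foldl altStep (ts, fs)).2 := by
  induction l generalizing ts fs with
  | nil => exact h
  | cons s rest ih =>
    simp only [List.foldl_cons]
    unfold altStep
    split_ifs with h1 h2
    · exact ih _ _ h
    · exact ih _ _ (by simp [PySem.Set.mem_add, h])
    · exact ih _ _ h

lemma isdisjoint_false_of_mem {x : String} {a b : PySem.Set String}
    (ha : x ∈ a) (hb : x ∈ b) : PySem.Set.isdisjoint a b = false := by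
  cases h : PySem.Set.isdisjoint a b with
  | false => rfl
  | true => exact absurd hb ((PySem.Set.isdisjoint_iff a b).mp h x ha)

lemma consSeenLoop_eq (l : List String) (seen : PySem.Dict String String)
    (ts fs : PySem.Set String)
    (hts : ∀ p, seen.get? p = some "True" ↔ p ∈ ts)
    (hfs : ∀ p, seen.get? p = some "False" ↔ p ∈ fs) :
    consSeenLoop l seen =
      PySem.Set.isdisjoint (l.foldl altStep (ts, fs)).1 (l.foldl altStep (ts, fs)).2 := by
  induction l generalizing seen ts fs with
  | nil =>
    simp only [consSeenLoop, List.foldl_nil]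
    refine ((PySem.Set.isdisjoint_iff ts fs).mpr ?_).symm
    intro x hx hx'
    have := ((hts x).mpr hx).symm.trans ((hfs x).mpr hx')
    simp at this
  | cons s rest ih =>
    simp only [consSeenLoop, List.foldl_cons]
    unfold altStep
    by_cases h1 : PySem.Str.endswith s " is True"
    · simp only [h1, if_true]
      by_cases h2 : seen.get? (PySem.Str.slice s none (some (-8))) = some "False"
      · simp only [h2, if_true]
        have hfsm : PySem.Str.slice s none (some (-8)) ∈ fs := (hfs _).mp h2
        have h1' : PySem.Str.slice s none (some (-8)) ∈
            PySem.Set.add ts (PySem.Str.slice s none (some (-8))) := by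
          simp [PySem.Set.mem_add]
        exact (isdisjoint_false_of_mem
          (mem_foldl_altStep_fst rest _ _ h1')
          (mem_foldl_altStep_snd rest _ _ hfsm)).symm
      · simp only [if_neg h2]
        refine ih _ _ _ ?_ ?_
        · intro q
          by_cases hq : q = PySem.Str.slice s none (some (-8))
          · subst hq
            simp [PySem.Dict.get?_insert_self, PySem.Set.mem_add]
          · rw [PySem.Dict.get?_insert_of_ne _ _ hq, hts q]
            simp [PySem.Set.mem_add, hq]
        · intro q
          by_cases hq : q = PySem.Str.slice s none (some (-8))
          · subst hq
            rw [PySem.Dict.get?_insert_self]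
            constructor
            · intro h; simp at h
            · intro h; exact absurd ((hfs _).mpr h) h2
          · rw [PySem.Dict.get?_insert_of_ne _ _ hq]; exact hfs q
    · simp only [h1, Bool.false_eq_true, if_false]
      by_cases h1' : PySem.Str.endswith s " is False"
      · simp only [h1', if_true]
        by_cases h2 : seen.get? (PySem.Str.slice s none (some (-9))) = some "True"
        · simp only [h2, if_true]
          have htsm : PySem.Str.slice s none (some (-9)) ∈ ts := (hts _).mp h2
          have h2' : PySem.Str.slice s none (some (-9)) ∈
              PySem.Set.add fs (PySem.Str.slice s none (some (-9))) := by
            simp [PySem.Set.mem_add]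
          exact (isdisjoint_false_of_mem
            (mem_foldl_altStep_fst rest _ _ htsm)
            (mem_foldl_altStep_snd rest _ _ h2')).symm
        · simp only [if_neg h2]
          refine ih _ _ _ ?_ ?_
          · intro q
            by_cases hq : q = PySem.Str.slice s none (some (-9))
            · subst hq
              rw [PySem.Dict.get?_insert_self]
              constructor
              · intro h; simp at h
              · intro h; exact absurd ((hts _).mpr h) h2
            · rw [PySem.Dict.get?_insert_of_ne _ _ hq]; exact hts q
          · intro q
            by_cases hq : q = PySem.Str.slice s none (some (-9))
            · subst hq
              simp [PySem.Dict.get?_insert_self, PySem.Set.mem_add]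
            · rw [PySem.Dict.get?_insert_of_ne _ _ hq, hfs q]
              simp [PySem.Set.mem_add, hq]
      · simp only [h1', Bool.false_eq_true, if_false]
        exact ih _ _ _ hts hfs

-- ===== VERDICT (by name: the statement is the Claim_ definition above) =====
theorem cons_is_valid_spec : Claim_equal_cons_is_valid := by
  intro cons _
  unfold Spec_cons_is_valid cons_is_valid cons_is_valid_alt
  exact consSeenLoop_eq cons PySem.Dict.empty [] []
    (fun p => by simp [PySem.Dict.get?_empty]) (fun p => by simp [PySem.Dict.get?_empty])
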